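-- pv_equiv track=rewrite | github.com/giacomo270197/Evpn-BMP-LIstener | plots.py | get_advertisers
-- ===== SOURCE A (Python) =====
-- def get_advertisers(events, new_advertisers, withdrawn_advertisers):
--     tmp_n = []
--     tmp_w = []
--     last = 0
--     for e in events:
--         tmp_n.append(new_advertisers[last:(last+len(e))])
--         tmp_w.append(withdrawn_advertisers[last:(last+len(e))])
--         last += len(e)
--     return tmp_n, tmp_w
-- ===== SOURCE B (Python) =====
-- def _chunk(events, xs):
--     # split successive prefixes off the remaining suffix; no offsets into xs
--     out = []
--     rest = xs
--     for e in events: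
--         k = len(e)
--         out.append(rest[:k])
--         rest = rest[k:]
--     return out
--
-- def get_advertisers(events, new_advertisers, withdrawn_advertisers):
--     return _chunk(events, new_advertisers), _chunk(events, withdrawn_advertisers)
-- ===== Notes on version B (the rewrite author's own statement) =====
-- stated objective: alternative
-- what changed: Drops the running-offset indexing entirely: a shared helper consumes the list, repeatedly splitting a prefix of len(e) off the remaining suffix (rest[:k] / rest[k:]), and is run as two staged passes, one per output list.
import Mathlib
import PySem

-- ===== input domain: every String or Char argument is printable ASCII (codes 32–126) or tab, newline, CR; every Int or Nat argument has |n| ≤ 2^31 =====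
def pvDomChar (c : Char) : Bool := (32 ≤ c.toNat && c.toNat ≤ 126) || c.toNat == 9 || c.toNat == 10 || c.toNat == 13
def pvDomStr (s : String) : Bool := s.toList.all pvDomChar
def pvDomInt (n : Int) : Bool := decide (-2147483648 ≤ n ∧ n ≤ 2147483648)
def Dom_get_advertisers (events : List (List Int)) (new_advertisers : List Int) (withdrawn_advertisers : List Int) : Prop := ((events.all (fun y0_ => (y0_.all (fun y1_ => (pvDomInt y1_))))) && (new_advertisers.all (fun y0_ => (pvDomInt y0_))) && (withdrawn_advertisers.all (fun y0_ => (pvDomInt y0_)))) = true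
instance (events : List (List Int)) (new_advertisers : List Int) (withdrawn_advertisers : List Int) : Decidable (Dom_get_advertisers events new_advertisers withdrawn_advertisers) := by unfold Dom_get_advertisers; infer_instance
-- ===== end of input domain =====

-- B removes the running-offset indexing: a shared helper consumes the list, splitting a
-- prefix of len(e) off the remaining suffix per event, run once per output list
-- (objective: alternative decomposition, same cost).


-- ===== PORT A =====
-- A: one loop; state = (tmp_n, tmp_w, last); per event append slices of the ORIGINAL lists
-- at [last, last+len(e)] and advance last.
def get_advertisers (events : List (List Int)) (new_advertisers : List Int) (withdrawn_advertisers : List Int) : List (List Int) × List (List Int) :=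
  let st := events.foldl
    (fun (st : List (List Int) × List (List Int) × Int) e =>
      (st.1 ++ [PySem.List.slice new_advertisers (some st.2.2) (some (st.2.2 + (e.length : Int)))],
       st.2.1 ++ [PySem.List.slice withdrawn_advertisers (some st.2.2) (some (st.2.2 + (e.length : Int)))],
       st.2.2 + (e.length : Int)))
    ([], [], 0)
  (st.1, st.2.1)

-- ===== PORT B =====
-- B's helper _chunk: loop state = (out, rest); per event split the prefix rest[:k] off the
-- remaining suffix (rest[:k] = take k, rest[k:] = drop k — exact for k = len(e) ≥ 0).
def pvChunk (events : List (List Int)) (xs : List Int) : List (List Int) :=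
  (events.foldl
    (fun (st : List (List Int) × List Int) e =>
      (st.1 ++ [st.2.take e.length], st.2.drop e.length))
    ([], xs)).1

def get_advertisers_alt (events : List (List Int)) (new_advertisers : List Int) (withdrawn_advertisers : List Int) : List (List Int) × List (List Int) :=
  (pvChunk events new_advertisers, pvChunk events withdrawn_advertisers)

-- ===== PRECONDITION & SPEC =====
def Spec_get_advertisers (events : List (List Int)) (new_advertisers : List Int) (withdrawn_advertisers : List Int) (out : List (List Int) × List (List Int)) : Prop := out = get_advertisers_alt events new_advertisers withdrawn_advertisers
instance (events : List (List Int)) (new_advertisers : List Int) (withdrawn_advertisers : List Int) (out : List (List Int) × List (List Int)) : Decidable (Spec_get_advertisers events new_advertisers withdrawn_advertisers out) := by unfold Spec_get_advertisers; infer_instance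

-- ===== CLAIM (what is proved, stated in full; the proofs are below) =====
def Claim_equal_get_advertisers : Prop := ∀ (events : List (List Int)) (new_advertisers : List Int) (withdrawn_advertisers : List Int), Dom_get_advertisers events new_advertisers withdrawn_advertisers → Spec_get_advertisers events new_advertisers withdrawn_advertisers (get_advertisers events new_advertisers withdrawn_advertisers)

-- ===== LEMMAS AND PROOFS =====

-- reference: the chunks of xs cut by the lengths of es, defined by structural recursion
def pvChunks (es : List (List Int)) (xs : List Int) : List (List Int) :=
  match es with
  | [] => []
  | e :: es => xs.take e.length :: pvChunks es (xs.drop e.length)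

theorem chunk_foldl_eq (es : List (List Int)) : ∀ (acc : List (List Int)) (xs : List Int),
    es.foldl
      (fun (st : List (List Int) × List Int) e =>
        (st.1 ++ [st.2.take e.length], st.2.drop e.length)) (acc, xs)
      = (acc ++ pvChunks es xs, xs.drop ((es.map List.length).sum)) := by
  induction es with
  | nil => intro acc xs; simp [pvChunks]
  | cons e es ih =>
    intro acc xs
    simp only [List.foldl_cons, ih, pvChunks, List.map_cons, List.sum_cons,
      List.drop_drop, List.append_assoc, List.singleton_append]

theorem foldlA_eq (na wa : List Int) (es : List (List Int)) :
    ∀ (an aw : List (List Int)) (n : Nat),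
    es.foldl
      (fun (st : List (List Int) × List (List Int) × Int) e =>
        (st.1 ++ [PySem.List.slice na (some st.2.2) (some (st.2.2 + (e.length : Int)))],
         st.2.1 ++ [PySem.List.slice wa (some st.2.2) (some (st.2.2 + (e.length : Int)))],
         st.2.2 + (e.length : Int))) (an, aw, (n : Int))
      = (an ++ pvChunks es (na.drop n), aw ++ pvChunks es (wa.drop n),
         ((n + (es.map List.length).sum : Nat) : Int)) := by
  induction es with
  | nil => intro an aw n; simp [pvChunks]
  | cons e es ih =>
    intro an aw n
    simp only [List.foldl_cons]
    have hcast : ((n : Int) + (e.length : Int)) = ((n + e.length : Nat) : Int) := by push_cast; ring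
    rw [PySem.List.slice_natCast_add, PySem.List.slice_natCast_add, hcast, ih]
    simp only [pvChunks, List.map_cons, List.sum_cons, List.drop_drop, List.append_assoc,
      List.singleton_append, Prod.mk.injEq]
    refine ⟨trivial, trivial, ?_⟩
    push_cast; ring

-- ===== VERDICT (by name: the statement is the Claim_ definition above) =====
theorem get_advertisers_spec : Claim_equal_get_advertisers := by
  intro events na wa _
  unfold Spec_get_advertisers get_advertisers get_advertisers_alt pvChunk
  have hA := foldlA_eq na wa events [] [] 0
  simp only [Nat.cast_zero] at hA
  rw [hA, chunk_foldl_eq events [] na, chunk_foldl_eq events [] wa]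
  simp
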